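-- pv_equiv track=rewrite | github.com/pypi-data/pypi-mirror-287 | packages/git-author-stats/git_author_stats-0.0.1-py3-none-any.whl/git_author_stats/_stats.py | map_authors_names
-- ===== SOURCE A (Python) =====
-- import unicodedata
-- from typing import Callable, Dict, Iterable, Optional, Set, Tuple, Union, cast
--
-- def normalize_author(author: str) -> str:
--     """
--     Normalize an author name.
--     """
--     if "<" in author:
--         # If there is an email address, use that as the normalized author name
--         author = author.partition("<")[2].strip("> ")
--     return unicodedata.normalize("NFKD", str(author)).strip().capitalize()
--
-- def map_authors_names_normalized(names: Iterable[str]) -> Dict[str, str]: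
--     """
--     Return a dictionary of author names, mapped to a normalized author name
--
--     Parameters:
--
--     - path (str): The path to the local repository
--     """
--     names_normalized: Dict[str, str] = {}
--     for name in names:
--         names_normalized[name] = normalize_author(name)
--     return names_normalized
--
-- def is_new_name_better_formatted(old: str, new: str) -> int:
--     """
--     Is `new` a better formatted variation of the name than `old`?
--     """
--     if old == new:
--         return False
--     # Pick the longer name, if there is a difference, defaulting to `old`
--     # if they are the same length
--     if len(old) < len(new):
--         return True
--     # Pick the one which has casing variation
--     old_is_uncased: bool = old.isupper() or old.islower()
--     new_is_uncased: bool = new.isupper() or new.islower()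
--     if old_is_uncased and not new_is_uncased:
--         return True
--     if new_is_uncased and not old_is_uncased:
--         return False
--     return False
--
-- def map_authors_names(names: Iterable[str]) -> Dict[str, str]:
--     """
--     Return a dictionary mapping author names to the best formatted variation
--     of the author's name
--     """
--     names_normalized: Dict[str, str] = map_authors_names_normalized(names)
--     # Map a normalized name to the best formatted variation
--     normalized_best: Dict[str, str] = {}
--     name: str
--     name_normalized: str
--     for name, name_normalized in names_normalized.items():
--         if name_normalized not in normalized_best:
--             normalized_best[name_normalized] = name
--         else:
--             if is_new_name_better_formatted(
--                 normalized_best[name_normalized], name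
--             ):
--                 normalized_best[name_normalized] = name
--     # Map all names to their best formatted variation
--     names_best: Dict[str, str] = {}
--     for name, name_normalized in names_normalized.items():
--         names_best[name] = normalized_best[name_normalized]
--     return names_best
-- ===== SOURCE B (Python) =====
-- import unicodedata
-- from typing import Dict, Iterable, List, Optional
--
--
-- def normalize_author(author: str) -> str:
--     if "<" in author:
--         author = author.partition("<")[2].strip("> ")
--     return unicodedata.normalize("NFKD", str(author)).strip().capitalize()
--
--
-- def is_new_name_better_formatted(old: str, new: str) -> int:
--     if old == new:
--         return False
--     if len(old) < len(new):
--         return True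
--     old_is_uncased: bool = old.isupper() or old.islower()
--     new_is_uncased: bool = new.isupper() or new.islower()
--     if old_is_uncased and not new_is_uncased:
--         return True
--     if new_is_uncased and not old_is_uncased:
--         return False
--     return False
--
--
-- def map_authors_names(names: Iterable[str]) -> Dict[str, str]:
--     """
--     Return a dictionary mapping author names to the best formatted variation
--     of the author's name
--     """
--     # Brute force, with no auxiliary dictionaries: dedup the names once, then
--     # for each name scan the whole deduplicated list for the best-formatted
--     # variant sharing its normalization (earlier name wins ties).
--     unique: List[str] = list(dict.fromkeys(names))
--     result: Dict[str, str] = {}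
--     for name in unique:
--         key = normalize_author(name)
--         chosen: Optional[str] = None
--         for other in unique:
--             if normalize_author(other) == key:
--                 if chosen is None or is_new_name_better_formatted(chosen, other):
--                     chosen = other
--         result[name] = chosen  # never None: `name` itself matches `key`
--     return result
-- ===== Notes on version B (the rewrite author's own statement) =====
-- stated objective: alternative
-- what changed: A keeps a running-best dict keyed by normalized name in one pass and then maps through it; B uses no auxiliary dictionaries at all: it dedups the names once and, for each name, rescans the whole deduplicated list to select the best-formatted variant with the same normalization (a quadratic brute-force scan in place of A's hash-indexed single pass).
import Mathlib
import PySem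

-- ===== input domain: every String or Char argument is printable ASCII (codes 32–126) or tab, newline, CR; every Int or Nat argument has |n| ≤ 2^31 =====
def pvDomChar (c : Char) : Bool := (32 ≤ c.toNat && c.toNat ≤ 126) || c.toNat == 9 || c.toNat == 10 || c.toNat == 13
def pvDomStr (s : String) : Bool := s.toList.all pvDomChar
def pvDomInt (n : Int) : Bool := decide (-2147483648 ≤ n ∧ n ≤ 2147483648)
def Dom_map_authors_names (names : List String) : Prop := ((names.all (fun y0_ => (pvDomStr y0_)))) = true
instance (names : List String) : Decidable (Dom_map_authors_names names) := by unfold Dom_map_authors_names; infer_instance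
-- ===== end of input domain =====

-- B replaces A's running-best dictionary with a brute-force rescan: dedup once,
-- then for each name scan the whole deduplicated list for the best-formatted
-- variant of its normalization; objective: alternative (no speed claim).

-- ===== PORT A =====
-- str.capitalize(): first char uppercased, rest lowercased (exact on ASCII,
-- where title-case of a char = upper-case).
def pyCapitalize : List Char → List Char
  | [] => []
  | c :: t => PySem.Chars.upperChar c :: PySem.Chars.lower t

-- str.isupper() / str.islower(): at least one cased char and no cased char of
-- the opposite case; on the ASCII domain the cased chars are exactly the letters.
def pyStrIsupper (cs : List Char) : Bool :=
  cs.any (fun c => PySem.Chars.isupper c || PySem.Chars.islower c) &&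
    cs.all (fun c => !PySem.Chars.islower c)

def pyStrIslower (cs : List Char) : Bool :=
  cs.any (fun c => PySem.Chars.isupper c || PySem.Chars.islower c) &&
    cs.all (fun c => !PySem.Chars.isupper c)

-- normalize_author: author.partition("<")[2] is everything after the FIRST '<'
-- (PySem.Chars.find gives that first index); unicodedata.normalize("NFKD", ·)
-- is the identity on the ASCII domain, so it is omitted.
def normalizeAuthor (author : String) : String :=
  let cs := author.toList
  let cs :=
    if PySem.Chars.isIn ['<'] cs then
      PySem.Chars.stripChars (cs.drop ((PySem.Chars.find cs ['<']).toNat + 1)) ['>', ' ']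
    else cs
  String.ofList (pyCapitalize (PySem.Chars.strip cs))

-- is_new_name_better_formatted (its Python returns the bools False/True)
def isNewNameBetterFormatted (old new_ : String) : Bool :=
  if old == new_ then false
  else if PySem.Str.len old < PySem.Str.len new_ then true
  else
    let old_is_uncased := pyStrIsupper old.toList || pyStrIslower old.toList
    let new_is_uncased := pyStrIsupper new_.toList || pyStrIslower new_.toList
    if old_is_uncased && !new_is_uncased then true
    else if new_is_uncased && !old_is_uncased then false
    else false

def map_authors_names (names : List String) : List (String × String) :=
  -- map_authors_names_normalized
  let namesNormalized : PySem.Dict String String :=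
    names.foldl (fun d name => d.insert name (normalizeAuthor name)) PySem.Dict.empty
  let normalizedBest : PySem.Dict String String :=
    namesNormalized.items.foldl
      (fun b p =>
        if !(b.contains p.2) then b.insert p.2 p.1
        else if isNewNameBetterFormatted (b.getD p.2 "") p.1 then b.insert p.2 p.1
        else b)
      PySem.Dict.empty
  -- normalized_best[name_normalized] always exists here; getD "" ports the lookup
  let namesBest : PySem.Dict String String :=
    namesNormalized.items.foldl
      (fun r p => r.insert p.1 (normalizedBest.getD p.2 "")) PySem.Dict.empty
  namesBest.items

-- ===== PORT B =====
-- the inner scan of Source B: chosen starts at None, takes the first name of the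
-- key's group and is replaced whenever a later matching name is better
def scanBest (key : String) (uniq : List String) : Option String :=
  uniq.foldl
    (fun chosen other =>
      if normalizeAuthor other == key then
        match chosen with
        | none => some other
        | some v => if isNewNameBetterFormatted v other then some other else some v
      else chosen)
    none

def map_authors_names_alt (names : List String) : List (String × String) :=
  -- list(dict.fromkeys(names))
  let uniq := PySem.List.dedup names
  -- `chosen` is never none here (name itself matches its key); getD ports the value
  (uniq.foldl
      (fun r name => r.insert name ((scanBest (normalizeAuthor name) uniq).getD ""))
      PySem.Dict.empty).items

-- ===== PRECONDITION & SPEC =====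
def Spec_map_authors_names (names : List String) (out : List (String × String)) : Prop := out = map_authors_names_alt names
instance (names : List String) (out : List (String × String)) : Decidable (Spec_map_authors_names names out) := by unfold Spec_map_authors_names; infer_instance

-- ===== CLAIM (what is proved, stated in full; the proofs are below) =====
def Claim_equal_map_authors_names : Prop := ∀ (names : List String), Dom_map_authors_names names → Spec_map_authors_names names (map_authors_names names)

-- ===== LEMMAS AND PROOFS =====

-- the optional-accumulator step both sides' selections reduce to
def oStep (o : Option String) (n : String) : Option String :=
  some (match o with
        | none => n
        | some v => if isNewNameBetterFormatted v n then n else v)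

theorem get?_foldl_insert_keyfun (f : String → String) (l : List String)
    (d : PySem.Dict String String) (k : String) :
    (l.foldl (fun d n => d.insert n (f n)) d).get? k
      = if k ∈ l then some (f k) else d.get? k := by
  induction l generalizing d with
  | nil => simp
  | cons n t ih =>
    simp only [List.foldl_cons, ih, List.mem_cons]
    by_cases hk : k = n
    · subst hk
      by_cases ht : k ∈ t <;> simp [ht, PySem.Dict.get?_insert_self]
    · by_cases ht : k ∈ t <;> simp [ht, hk, PySem.Dict.get?_insert_of_ne _ _ hk]

theorem nn_items (names : List String) :
    (names.foldl (fun d name => d.insert name (normalizeAuthor name)) PySem.Dict.empty).items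
      = (PySem.List.dedup names).map (fun n => (n, normalizeAuthor n)) := by
  have hnd : (names.foldl (fun d name => d.insert name (normalizeAuthor name)) PySem.Dict.empty).keys.Nodup :=
    PySem.Dict.nodup_keys_foldl_insert names (fun _ n => normalizeAuthor n) _ PySem.Dict.nodup_keys_empty
  have hkeys : (names.foldl (fun d name => d.insert name (normalizeAuthor name)) PySem.Dict.empty).keys
      = PySem.List.dedup names := by
    rw [PySem.Dict.keys_foldl_insert]
    simp [PySem.Set.update, PySem.List.dedup_eq_ofList, PySem.Set.ofList_eq_foldl]
  rw [PySem.Dict.items_eq_map_keys _ hnd "", hkeys]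
  refine List.map_congr_left ?_
  intro k hk
  have hk' : k ∈ names := (PySem.List.mem_dedup _ _).1 hk
  have := get?_foldl_insert_keyfun normalizeAuthor names PySem.Dict.empty k
  rw [if_pos hk'] at this
  simp [PySem.Dict.getD_eq_get?_getD, this]

-- A's running-best dict, read at one key, is the oStep-fold of that key's group
theorem bestA_get? (l : List String) (b : PySem.Dict String String) (k : String) :
    (l.foldl (fun b n =>
        if !(b.contains (normalizeAuthor n)) then b.insert (normalizeAuthor n) n
        else if isNewNameBetterFormatted (b.getD (normalizeAuthor n) "") n then
          b.insert (normalizeAuthor n) n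
        else b) b).get? k
      = (l.filter (fun n => normalizeAuthor n == k)).foldl oStep (b.get? k) := by
  induction l generalizing b with
  | nil => simp
  | cons n t ih =>
    simp only [List.foldl_cons, List.filter_cons]
    by_cases hk : normalizeAuthor n = k
    · simp only [hk, beq_self_eq_true, if_pos, List.foldl_cons]
      rw [ih]
      congr 1
      cases h : b.get? k with
      | none =>
        have hc : b.contains k = false := by
          rw [PySem.Dict.contains_eq_isSome_get?, h]; rfl
        simp [hc, PySem.Dict.get?_insert_self, oStep]
      | some v =>
        have hc : b.contains k = true := by
          rw [PySem.Dict.contains_eq_isSome_get?, h]; rfl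
        have hg : b.getD k "" = v := PySem.Dict.getD_of_get?_eq_some _ _ h
        by_cases hb : isNewNameBetterFormatted v n = true
        · simp [hc, hg, hb, PySem.Dict.get?_insert_self, oStep]
        · simp [hc, hg, hb, h, oStep]
    · have hne : (normalizeAuthor n == k) = false := by simp [hk]
      simp only [hne, Bool.false_eq_true, if_false]
      rw [ih]
      congr 1
      have hkn : k ≠ normalizeAuthor n := fun h => hk h.symm
      by_cases hc : b.contains (normalizeAuthor n) = true
      · by_cases hb : isNewNameBetterFormatted (b.getD (normalizeAuthor n) "") n = true
        · simp [hc, hb, PySem.Dict.get?_insert_of_ne _ _ hkn]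
        · simp [hc, hb]
      · simp [Bool.not_eq_true] at hc
        simp [hc, PySem.Dict.get?_insert_of_ne _ _ hkn]

-- B's guarded scan is the oStep-fold of the same group
theorem scanBest_eq_filter (key : String) (l : List String) (c : Option String) :
    l.foldl
      (fun chosen other =>
        if normalizeAuthor other == key then
          match chosen with
          | none => some other
          | some v => if isNewNameBetterFormatted v other then some other else some v
        else chosen) c
      = (l.filter (fun n => normalizeAuthor n == key)).foldl oStep c := by
  induction l generalizing c with
  | nil => rfl
  | cons n t ih =>
    simp only [List.foldl_cons, List.filter_cons]
    by_cases hk : (normalizeAuthor n == key) = true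
    · simp only [hk, if_pos, List.foldl_cons]
      rw [ih]
      congr 1
      cases c with
      | none => rfl
      | some v => by_cases hb : isNewNameBetterFormatted v n = true <;> simp [oStep, hb]
    · rw [Bool.not_eq_true] at hk
      simp only [hk, Bool.false_eq_true, if_false]
      exact ih c

-- ===== VERDICT (by name: the statement is the Claim_ definition above) =====
theorem map_authors_names_spec : Claim_equal_map_authors_names := by
  intro names _
  unfold Spec_map_authors_names
  simp only [map_authors_names, map_authors_names_alt]
  rw [nn_items]
  simp only [List.foldl_map]
  rw [PySem.List.foldl_congr_mem (g := fun r n =>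
      r.insert n ((scanBest (normalizeAuthor n) (PySem.List.dedup names)).getD ""))]
  intro acc x hx
  rw [PySem.Dict.getD_eq_get?_getD, bestA_get?, PySem.Dict.get?_empty]
  simp only [scanBest, scanBest_eq_filter]
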